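-- pv_equiv track=rewrite | github.com/Ararsa-Derese/competitive-programming- | 1273-compare-strings-by-frequency-of-the-smallest-character/1273-compare-strings-by-frequency-of-the-smallest-character.py | numSmallerByFrequency
-- ===== SOURCE A (Python) =====
-- from typing import List
--
-- from collections import Counter
--
-- def numSmallerByFrequency(queries: List[str], words: List[str]) -> List[int]:
--     w=[]
--     for word in words:
--         w.append(Counter(word)[min(word)])
--     w.sort()
--     result=[]
--     for q in queries:
--         curr=0
--         query=Counter(q)[min(q)]
--         for i in range(len(w)):
--             if w[i]>query:
--                 curr=len(w)-i
--                 break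
--         result.append(curr)
--     return result
-- ===== SOURCE B (Python) =====
-- from typing import List
--
--
-- def count_greater(ws, fq):
--     # binary search in the sorted list ws for the first element > fq
--     lo, hi = 0, len(ws)
--     while lo < hi:
--         mid = (lo + hi) // 2
--         if ws[mid] <= fq:
--             lo = mid + 1
--         else:
--             hi = mid
--     return len(ws) - lo
--
--
-- def numSmallerByFrequency(queries: List[str], words: List[str]) -> List[int]:
--     def f(s: str) -> int:
--         return s.count(min(s))
--
--     ws = sorted(f(w) for w in words)
--     return [count_greater(ws, f(q)) for q in queries]
-- ===== Notes on version B (the rewrite author's own statement) =====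
-- stated objective: faster
-- what changed: B replaces A's per-query linear break-scan over the sorted frequency list with a hand-written binary search (bisect_right) for the first frequency exceeding the query's, and computes each frequency as s.count(min(s)) instead of Counter(s)[min(s)].
import Mathlib
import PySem

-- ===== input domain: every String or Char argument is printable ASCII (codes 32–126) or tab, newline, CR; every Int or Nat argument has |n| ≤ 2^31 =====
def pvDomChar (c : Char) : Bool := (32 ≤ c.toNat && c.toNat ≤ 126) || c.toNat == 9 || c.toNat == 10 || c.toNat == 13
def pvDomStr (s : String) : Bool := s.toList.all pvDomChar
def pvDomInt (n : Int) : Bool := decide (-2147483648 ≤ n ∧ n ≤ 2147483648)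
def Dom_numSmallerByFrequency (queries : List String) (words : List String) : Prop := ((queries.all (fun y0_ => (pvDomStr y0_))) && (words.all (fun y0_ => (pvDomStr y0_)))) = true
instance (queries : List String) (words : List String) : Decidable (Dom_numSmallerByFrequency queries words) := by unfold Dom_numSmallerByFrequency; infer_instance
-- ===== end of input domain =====

-- B replaces A's per-query linear break-scan with a binary search in the sorted
-- frequency list (objective: faster; same return value on all non-empty strings).


-- ===== PORT A =====
-- Counter(s)[min(s)]: min(s) raises ValueError on the empty string (min? = none there;
-- excluded by Pre_, the 0 branch is unreachable on admitted inputs).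
def pyFreqA (s : String) : Int :=
  match PySem.List.min? s.toList (fun c => c) with
  | some m => (PySem.Dict.counter s.toList).getD m 0
  | none => 0

-- 'for i in range(len(w)): if w[i] > query: curr = len(w) - i; break' — at index i the
-- remaining suffix has length len(w) - i, so the scan carries the suffix.
def breakScanA (q : Int) : List Int → Int
  | [] => 0
  | x :: rest => if q < x then ((x :: rest).length : Int) else breakScanA q rest

def numSmallerByFrequency (queries : List String) (words : List String) : List Int :=
  let w := words.foldl (fun acc word => acc ++ [pyFreqA word]) []
  let ws := PySem.List.sorted w (fun x => x) false
  queries.foldl (fun res q => res ++ [breakScanA (pyFreqA q) ws]) []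

-- ===== PORT B =====
-- s.count(min(s)); min(s) raises on "" exactly as in A (excluded by Pre_).
def pyFreqB (s : String) : Int :=
  match PySem.List.min? s.toList (fun c => c) with
  | some m => (s.toList.count m : Int)
  | none => 0

-- the 'while lo < hi' binary-search loop of count_greater; lo, hi are nonnegative
-- throughout, so Python's (lo + hi) // 2 and the loop are exact over Nat; ws[mid] is
-- always in range (mid < hi ≤ len ws), ported as getD with default 0
def bsearchGo (fuel : Nat) (ws : List Int) (fq : Int) (lo hi : Nat) : Nat :=
  match fuel with
  | 0 => lo
  | fuel + 1 =>
    if lo < hi then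
      let mid := (lo + hi) / 2
      if ws.getD mid 0 ≤ fq then bsearchGo fuel ws fq (mid + 1) hi
      else bsearchGo fuel ws fq lo mid
    else lo

def bsearchB (ws : List Int) (fq : Int) (lo hi : Nat) : Nat :=
  -- fuel hi - lo ≥ the number of loop iterations (the interval shrinks every step),
  -- so this is exactly the while loop
  bsearchGo (hi - lo) ws fq lo hi

def countGreaterB (ws : List Int) (fq : Int) : Int :=
  (ws.length : Int) - (bsearchB ws fq 0 ws.length : Int)

def numSmallerByFrequency_alt (queries : List String) (words : List String) : List Int :=
  let ws := PySem.List.sorted (words.map pyFreqB) (fun x => x) false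
  queries.map (fun q => countGreaterB ws (pyFreqB q))

-- ===== PRECONDITION & SPEC =====
-- Pre_ excludes an empty string among queries or words: min('') raises ValueError in
-- both A and B, so neither returns there.
def Pre_numSmallerByFrequency (queries : List String) (words : List String) : Prop :=
  (∀ q ∈ queries, q ≠ "") ∧ (∀ w ∈ words, w ≠ "")
instance (queries : List String) (words : List String) : Decidable (Pre_numSmallerByFrequency queries words) := by unfold Pre_numSmallerByFrequency; infer_instance

def pvWitness_numSmallerByFrequency : List String × List String := (["cbd", "aa"], ["zaaaz", "b", "ab"])

def Spec_numSmallerByFrequency (queries : List String) (words : List String) (out : List Int) : Prop := out = numSmallerByFrequency_alt queries words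
instance (queries : List String) (words : List String) (out : List Int) : Decidable (Spec_numSmallerByFrequency queries words out) := by unfold Spec_numSmallerByFrequency; infer_instance

-- ===== CLAIM (what is proved, stated in full; the proofs are below) =====
def Claim_equal_numSmallerByFrequency : Prop := ∀ (queries : List String) (words : List String), Dom_numSmallerByFrequency queries words → Pre_numSmallerByFrequency queries words → Spec_numSmallerByFrequency queries words (numSmallerByFrequency queries words)

-- ===== LEMMAS AND PROOFS =====

-- the two frequency helpers compute the same value
theorem pyFreq_eq (s : String) : pyFreqA s = pyFreqB s := by
  unfold pyFreqA pyFreqB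
  cases h : PySem.List.min? s.toList (fun c => c) with
  | none => rfl
  | some m => simp [PySem.Dict.getD_counter]

-- on a ≤-sorted list, A's break scan returns the number of elements greater than q
theorem breakScanA_sorted (q : Int) (ws : List Int) (h : ws.Pairwise (· ≤ ·)) :
    breakScanA q ws = (ws.countP (fun x => decide (q < x)) : Int) := by
  induction ws with
  | nil => simp [breakScanA]
  | cons x rest ih =>
    rcases List.pairwise_cons.mp h with ⟨hx, hrest⟩
    by_cases hq : q < x
    · have hall : rest.countP (fun x => decide (q < x)) = rest.length :=
        List.countP_eq_length.mpr (fun y hy => by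
          simp only [decide_eq_true_eq]; exact lt_of_lt_of_le hq (hx y hy))
      simp [breakScanA, hq, hall]
    · simp [breakScanA, hq, ih hrest]

-- bsearchGo, run on a ≤-sorted list between invariant-respecting bounds with enough
-- fuel, returns the first index whose element exceeds fq (everything below it is ≤ fq,
-- everything from it on is > fq)
theorem bsearchGo_spec (ws : List Int) (fq : Int) (hs : ws.Pairwise (fun a b => a ≤ b)) :
    ∀ (fuel lo hi : Nat), hi - lo ≤ fuel → hi ≤ ws.length → lo ≤ hi →
    (∀ i (hil : i < ws.length), i < lo → ws[i] ≤ fq) →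
    (∀ i (hil : i < ws.length), hi ≤ i → fq < ws[i]) →
    lo ≤ bsearchGo fuel ws fq lo hi ∧ bsearchGo fuel ws fq lo hi ≤ hi ∧
    (∀ i (hil : i < ws.length), i < bsearchGo fuel ws fq lo hi → ws[i] ≤ fq) ∧
    (∀ i (hil : i < ws.length), bsearchGo fuel ws fq lo hi ≤ i → fq < ws[i]) := by
  intro fuel
  induction fuel with
  | zero =>
    intro lo hi hf h1 h2 h3 h4
    have : lo = hi := by omega
    simp only [bsearchGo]
    exact ⟨le_rfl, by omega, fun i hil hlt => h3 i hil hlt,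
      fun i hil hge => h4 i hil (this ▸ hge)⟩
  | succ fuel ih =>
    intro lo hi hf h1 h2 h3 h4
    rw [bsearchGo]
    by_cases h : lo < hi
    · simp only [h, if_pos]
      have hmlen : (lo + hi) / 2 < ws.length := by omega
      have hmono := List.pairwise_iff_getElem.mp hs
      rw [List.getD_eq_getElem ws 0 hmlen]
      by_cases hc : ws[(lo + hi) / 2] ≤ fq
      · rw [if_pos hc]
        have := ih ((lo + hi) / 2 + 1) hi (by omega) h1 (by omega)
          (fun i hil hlt => by
            rcases Nat.lt_succ_iff_lt_or_eq.mp hlt with hlt' | heq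
            · exact le_trans (hmono i ((lo + hi) / 2) hil hmlen hlt') hc
            · subst heq; exact hc)
          h4
        exact ⟨by omega, this.2.1, this.2.2.1, this.2.2.2⟩
      · rw [if_neg hc]
        have := ih lo ((lo + hi) / 2) (by omega) (by omega) (by omega) h3
          (fun i hil hge => by
            rcases Nat.eq_or_lt_of_le hge with heq | hlt
            · subst heq; omega
            · exact lt_of_not_ge hc |>.trans_le (hmono ((lo + hi) / 2) i hmlen hil hlt))
        exact ⟨this.1, by omega, this.2.2.1, this.2.2.2⟩
    · simp only [h, if_false]
      have : lo = hi := by omega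
      exact ⟨le_rfl, by omega, fun i hil hlt => h3 i hil hlt,
        fun i hil hge => h4 i hil (this ▸ hge)⟩

-- on a ≤-sorted list, B's binary-search count equals the number of elements > fq
theorem countGreaterB_sorted (ws : List Int) (fq : Int) (hs : ws.Pairwise (fun a b => a ≤ b)) :
    countGreaterB ws fq = (ws.countP (fun x => decide (fq < x)) : Int) := by
  have hb : bsearchB ws fq 0 ws.length = bsearchGo ws.length ws fq 0 ws.length := by
    simp [bsearchB]
  obtain ⟨-, hle, hlow, hhigh⟩ := bsearchGo_spec ws fq hs ws.length 0 ws.length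
    (by omega) le_rfl (Nat.zero_le _)
    (fun i _ hlt => absurd hlt (Nat.not_lt_zero i))
    (fun i hil hge => absurd hil (by omega))
  have hcount : ws.countP (fun x => decide (fq < x)) = ws.length - bsearchGo ws.length ws fq 0 ws.length := by
    conv_lhs => rw [← List.take_append_drop (bsearchGo ws.length ws fq 0 ws.length) ws]
    rw [List.countP_append]
    have htake : (ws.take (bsearchGo ws.length ws fq 0 ws.length)).countP (fun x => decide (fq < x)) = 0 := by
      apply List.countP_eq_zero.mpr
      intro x hx
      obtain ⟨i, hi, rfl⟩ := List.mem_iff_getElem.mp hx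
      rw [List.length_take] at hi
      rw [List.getElem_take]
      simpa using not_lt.mpr (hlow i (by omega) (by omega))
    have hdrop : (ws.drop (bsearchGo ws.length ws fq 0 ws.length)).countP (fun x => decide (fq < x)) =
        (ws.drop (bsearchGo ws.length ws fq 0 ws.length)).length := by
      apply List.countP_eq_length.mpr
      intro x hx
      obtain ⟨i, hi, rfl⟩ := List.mem_iff_getElem.mp hx
      rw [List.length_drop] at hi
      rw [List.getElem_drop]
      simpa using hhigh _ (by omega) (by omega)
    rw [htake, hdrop, List.length_drop]
    omega
  rw [countGreaterB, hb, hcount]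
  omega

-- ===== VERDICT (by name: the statement is the Claim_ definition above) =====
theorem numSmallerByFrequency_spec : Claim_equal_numSmallerByFrequency := by
  intro queries words _ _
  show _ = _
  unfold numSmallerByFrequency numSmallerByFrequency_alt
  simp only [PySem.List.foldl_append_singleton_eq_map, List.nil_append]
  apply List.map_congr_left
  intro q _
  rw [show List.map pyFreqA words = List.map pyFreqB words from
        List.map_congr_left (fun x _ => pyFreq_eq x)] at *
  rw [pyFreq_eq, breakScanA_sorted _ _ (PySem.List.sorted_pairwise _ _),
      countGreaterB_sorted _ _ (PySem.List.sorted_pairwise _ _)]
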